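-- pv_equiv track=rewrite | github.com/jimmychen09/practicepython | Project 1 part 6.py | analyze_traffic
-- ===== SOURCE A (Python) =====
-- def analyze_traffic(addresses, limit):
-- 	traffic = {}
-- 	blacklist = []
-- 	for address in addresses:
-- 		if address not in traffic:
-- 			traffic[address] = 1
-- 		else:
-- 			traffic[address] += 1
-- 		if traffic[address] > limit:
-- 			if address not in blacklist:
-- 				blacklist.append(address)
-- 	return blacklist
-- ===== SOURCE B (Python) =====
-- def analyze_traffic(addresses, limit):
--     # Index-table strategy: record every position of each address, then emit, in
--     # positional order, each address exactly at its threshold-crossing position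
--     # (its k-th occurrence, where k = max(limit + 1, 1) is the smallest count
--     # exceeding limit).
--     k = max(limit + 1, 1)
--     positions = {}
--     for i, a in enumerate(addresses):
--         positions.setdefault(a, []).append(i)
--     return [a for i, a in enumerate(addresses)
--             if len(positions[a]) >= k and positions[a][k - 1] == i]
-- ===== Notes on version B (the rewrite author's own statement) =====
-- stated objective: alternative
-- what changed: Replaces A's incremental count-dict with append-on-first-exceed (guarded by a linear blacklist membership scan) by a two-phase index-table strategy: build a dict of occurrence positions via enumerate, compute the crossing count k = max(limit+1, 1) in closed form, and emit each qualifying address exactly at its k-th occurrence position.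
import Mathlib
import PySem

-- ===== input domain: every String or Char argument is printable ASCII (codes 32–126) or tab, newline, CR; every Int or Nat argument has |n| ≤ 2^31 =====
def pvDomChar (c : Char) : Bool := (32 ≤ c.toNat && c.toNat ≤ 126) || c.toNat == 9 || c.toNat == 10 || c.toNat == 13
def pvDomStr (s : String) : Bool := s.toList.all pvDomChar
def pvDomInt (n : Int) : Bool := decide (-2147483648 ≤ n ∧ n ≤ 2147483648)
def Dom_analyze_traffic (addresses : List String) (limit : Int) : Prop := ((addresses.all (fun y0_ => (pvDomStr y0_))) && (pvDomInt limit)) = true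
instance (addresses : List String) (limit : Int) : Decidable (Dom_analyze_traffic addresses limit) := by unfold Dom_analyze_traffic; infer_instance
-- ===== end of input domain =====

-- B replaces A's incremental count-dict + append-on-first-exceed pass (with its linear
-- blacklist membership scan) by an index table of occurrence positions plus a
-- closed-form crossing count k = max(limit+1, 1); objective: alternative.

-- ===== PORT A =====
-- A's loop body (literal: the branched dict update, then the threshold/membership test)
def pvStepA (limit : Int) (st : PySem.Dict String Int × List String) (address : String) :
    PySem.Dict String Int × List String :=
  let traffic :=
    if st.1.contains address = false then st.1.insert address 1
    else st.1.modify address 0 (· + 1)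
  -- traffic[address] after the update: the key is present, so getD is exact
  let blacklist :=
    if traffic.getD address 0 > limit then
      if address ∉ st.2 then st.2 ++ [address] else st.2
    else st.2
  (traffic, blacklist)

def analyze_traffic (addresses : List String) (limit : Int) : List String :=
  (addresses.foldl (pvStepA limit) (PySem.Dict.empty, [])).2

-- ===== PORT B =====
-- phase 1 of Source B: positions[a] = list of indices where a occurs (setdefault/append loop)
def pvPositions (addresses : List String) : PySem.Dict String (List Int) :=
  (PySem.List.enumerate addresses 0).foldl
    (fun d p => d.modify p.2 [] (· ++ [p.1])) PySem.Dict.empty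

def analyze_traffic_alt (addresses : List String) (limit : Int) : List String :=
  let k := max (limit + 1) 1
  let positions := pvPositions addresses
  -- positions[a] never raises (a is always a key); positions[a][k-1] is guarded in range
  (PySem.List.enumerate addresses 0).filterMap (fun p =>
    if k ≤ ((positions.getD p.2 []).length : Int) ∧
        PySem.List.pyGet? (positions.getD p.2 []) (k - 1) = some p.1
    then some p.2 else none)

-- ===== PRECONDITION & SPEC =====
def Spec_analyze_traffic (addresses : List String) (limit : Int) (out : List String) : Prop := out = analyze_traffic_alt addresses limit
instance (addresses : List String) (limit : Int) (out : List String) : Decidable (Spec_analyze_traffic addresses limit out) := by unfold Spec_analyze_traffic; infer_instance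

-- ===== CLAIM (what is proved, stated in full; the proofs are below) =====
def Claim_equal_analyze_traffic : Prop := ∀ (addresses : List String) (limit : Int), Dom_analyze_traffic addresses limit → Spec_analyze_traffic addresses limit (analyze_traffic addresses limit)

-- ===== LEMMAS AND PROOFS =====

-- common reference point: the crossing list in one pass — the address at each
-- position whose prefix count there is exactly k
def pvF (l : List String) (k : Int) : List String :=
  (PySem.List.enumerate l 0).filterMap (fun p =>
    if ((l.take (p.1.toNat + 1)).count p.2 : Int) = k then some p.2 else none)

-- the occurrence positions of a in l, as B's positions table stores them
def pvOcc (l : List String) (a : String) : List Int :=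
  ((PySem.List.enumerate l 0).filter (fun p => p.2 == a)).map (·.1)

theorem pvPyGet?_of_nonneg {α : Type} (xs : List α) (n : Int) (h : 0 ≤ n) :
    PySem.List.pyGet? xs n = xs[n.toNat]? := by
  simp only [PySem.List.pyGet?, PySem.List.pyIdx?]
  by_cases h2 : n < (xs.length : Int)
  · simp [h, h2]
  · simp [h, h2]

theorem pvEnumerate_append_singleton (l : List String) (x : String) :
    PySem.List.enumerate (l ++ [x]) 0 =
      PySem.List.enumerate l 0 ++ [((l.length : Int), x)] := by
  simp [PySem.List.enumerate_append, PySem.List.enumerate_cons]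

theorem pvOcc_append (l : List String) (x a : String) :
    pvOcc (l ++ [x]) a = pvOcc l a ++ (if x == a then [(l.length : Int)] else []) := by
  unfold pvOcc
  rw [pvEnumerate_append_singleton, List.filter_append, List.map_append]
  by_cases h : x == a <;> simp [h]

theorem pvOcc_length (l : List String) (a : String) :
    (pvOcc l a).length = l.count a := by
  induction l using List.reverseRecOn with
  | nil => simp [pvOcc, PySem.List.enumerate]
  | append_singleton l x ih =>
      rw [pvOcc_append, List.length_append, ih, List.count_append]
      by_cases h : x = a <;> simp [h]

theorem pvOcc_mem_lt (l : List String) (a : String) (m : Int) (hm : m ∈ pvOcc l a) :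
    0 ≤ m ∧ m < (l.length : Int) := by
  unfold pvOcc at hm
  obtain ⟨p, hp, rfl⟩ := List.mem_map.mp hm
  obtain ⟨hpm, -⟩ := List.mem_filter.mp hp
  obtain ⟨j, hj, rfl⟩ := (PySem.List.mem_enumerate_iff _ _ _).mp hpm
  simp only [zero_add]
  omega

theorem pvOcc_getElem? (l : List String) (a : String) :
    ∀ (j i : Nat), i < l.length → l[i]? = some a →
      ((pvOcc l a)[j]? = some (i : Int) ↔ (l.take (i + 1)).count a = j + 1) := by
  induction l using List.reverseRecOn with
  | nil => intro j i hi _; simp at hi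
  | append_singleton l x ih =>
      intro j i hi hval
      rw [pvOcc_append]
      have hlen := pvOcc_length l a
      by_cases hil : i < l.length
      · have hval' : l[i]? = some a := by
          rwa [List.getElem?_append_left hil] at hval
        have htake : (l ++ [x]).take (i + 1) = l.take (i + 1) :=
          List.take_append_of_le_length (by omega)
        rw [htake]
        by_cases hx : x == a
        · simp only [hx, if_pos]
          by_cases hj : j < (pvOcc l a).length
          · rw [List.getElem?_append_left hj]
            exact ih j i hil hval'
          · rw [List.getElem?_append_right (by omega)]
            have hcnt : (l.take (i + 1)).count a ≤ l.count a :=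
              (List.take_sublist _ _).count_le a
            apply iff_of_false
            · intro h
              by_cases hje : j - (pvOcc l a).length = 0
              · rw [hje] at h
                simp only [List.getElem?_singleton] at h
                simp at h
                omega
              · rw [List.getElem?_eq_none_iff.mpr (by simp; omega)] at h
                exact absurd h (by simp)
            · intro h; omega
        · simp only [hx, Bool.false_eq_true, if_false, List.append_nil]
          exact ih j i hil hval'
      · have hieq : i = l.length := by
          rw [List.length_append, List.length_singleton] at hi; omega
        subst hieq
        have hxa : x = a := by
          rw [List.getElem?_append_right (Nat.le_refl _), Nat.sub_self] at hval
          simpa using hval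
        subst hxa
        have htake : (l ++ [x]).take (l.length + 1) = l ++ [x] :=
          List.take_of_length_le (by simp)
        rw [htake, if_pos (by simp), List.count_append]
        have hcs : [x].count x = 1 := by simp
        rw [hcs]
        by_cases hj : j < (pvOcc l x).length
        · rw [List.getElem?_append_left hj]
          apply iff_of_false
          · intro h
            have hmem : ((l.length : Int)) ∈ pvOcc l x := List.mem_of_getElem? h
            have := pvOcc_mem_lt l x _ hmem
            omega
          · omega
        · rw [List.getElem?_append_right (by omega)]
          by_cases hje : j - (pvOcc l x).length = 0
          · rw [hje]
            simp only [List.getElem?_singleton]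
            constructor
            · intro _; omega
            · intro _; rfl
          · rw [List.getElem?_eq_none_iff.mpr (by simp; omega)]
            apply iff_of_false
            · intro h; exact absurd h (by simp)
            · omega

theorem pvF_append (l : List String) (x : String) (k : Int) :
    pvF (l ++ [x]) k = pvF l k ++ (if ((l.count x : Int) + 1 = k) then [x] else []) := by
  unfold pvF
  rw [pvEnumerate_append_singleton, List.filterMap_append]
  congr 1
  · apply List.filterMap_congr
    intro p hp
    obtain ⟨j, hj, rfl⟩ := (PySem.List.mem_enumerate_iff _ _ _).mp hp
    have htake : (l ++ [x]).take (((0 : Int) + (j : Int)).toNat + 1) = l.take (((0 : Int) + (j : Int)).toNat + 1) := by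
      rw [zero_add, Int.toNat_natCast]
      exact List.take_append_of_le_length (by omega)
    rw [htake]
  · simp only [List.filterMap_cons, List.filterMap_nil]
    have htake : (l ++ [x]).take (l.length + 1) = l ++ [x] :=
      List.take_of_length_le (by simp)
    have hcnt : ((l ++ [x]).count x : Int) = (l.count x : Int) + 1 := by
      rw [List.count_append]; simp
    by_cases h : ((l.count x : Int) + 1 = k)
    · rw [if_pos h]
      simp [htake, h]
    · rw [if_neg h]
      simp [htake, h]

theorem pvMem_pvF (l : List String) (k : Int) (hk : 1 ≤ k) (x : String) :
    x ∈ pvF l k ↔ k ≤ (l.count x : Int) := by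
  induction l using List.reverseRecOn with
  | nil =>
      simp only [pvF, PySem.List.enumerate_nil, List.filterMap_nil, List.not_mem_nil,
        List.count_nil, false_iff]
      omega
  | append_singleton l y ih =>
      rw [pvF_append, List.mem_append, ih, List.count_append]
      by_cases hxy : x = y
      · subst hxy
        have h1 : [x].count x = 1 := by simp
        rw [h1]
        by_cases hc : ((l.count x : Int) + 1 = k)
        · rw [if_pos hc]
          simp only [List.mem_singleton, or_true, true_iff]
          push_cast
          omega
        · rw [if_neg hc]
          simp only [List.not_mem_nil, or_false]
          push_cast
          omega
      · have h1 : [y].count x = 0 := List.count_eq_zero.mpr (by simp [hxy])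
        rw [h1]
        by_cases hc : ((l.count y : Int) + 1 = k)
        · rw [if_pos hc]
          simp only [List.mem_singleton, hxy, or_false]
          push_cast
          omega
        · rw [if_neg hc]
          simp only [List.not_mem_nil, or_false]
          push_cast
          omega

-- ---- A-side: the fold state is (counter of the prefix, pvF of the prefix) ----

theorem pvStepA_dict (d : PySem.Dict String Int) (a : String) :
    (if d.contains a = false then d.insert a 1 else d.modify a 0 (· + 1)) =
      d.modify a 0 (· + 1) := by
  by_cases h : d.contains a = false
  · rw [if_pos h]
    simp [PySem.Dict.modify, PySem.Dict.getD_of_not_contains, h]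
  · rw [if_neg h]

theorem pvStepA_eq (l : List String) (x : String) (limit : Int) :
    pvStepA limit (PySem.Dict.counter l, pvF l (max (limit + 1) 1)) x =
      (PySem.Dict.counter (l ++ [x]), pvF (l ++ [x]) (max (limit + 1) 1)) := by
  set k := max (limit + 1) 1 with hkdef
  have hk : 1 ≤ k := le_max_right _ _
  unfold pvStepA
  dsimp only
  rw [pvStepA_dict, ← PySem.Dict.counter_append_singleton]
  have hgetD : (PySem.Dict.counter (l ++ [x])).getD x 0 = (l.count x : Int) + 1 := by
    rw [PySem.Dict.getD_counter, List.count_append]; simp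
  rw [hgetD]
  have hmem : x ∈ pvF l k ↔ k ≤ (l.count x : Int) := pvMem_pvF l k hk x
  rw [pvF_append]
  have hc0 : (0 : Int) ≤ (l.count x : Int) := by positivity
  by_cases hlim : (l.count x : Int) + 1 > limit
  · rw [if_pos hlim]
    by_cases hin : x ∈ pvF l k
    · rw [if_neg (by simpa using hin)]
      rw [if_neg (by rw [hmem] at hin; omega)]
      simp
    · rw [if_pos (by simpa using hin)]
      rw [if_pos (by rw [hmem] at hin; omega)]
  · rw [if_neg hlim]
    rw [if_neg (by omega)]
    simp

theorem pvA_loop (l : List String) (limit : Int) :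
    l.foldl (pvStepA limit) (PySem.Dict.empty, []) =
      (PySem.Dict.counter l, pvF l (max (limit + 1) 1)) := by
  induction l using List.reverseRecOn with
  | nil =>
      simp [pvF, PySem.List.enumerate_nil, PySem.Dict.counter]
  | append_singleton l x ih =>
      rw [List.foldl_append, ih, List.foldl_cons, List.foldl_nil, pvStepA_eq]

theorem pvA_eq_pvF (l : List String) (limit : Int) :
    analyze_traffic l limit = pvF l (max (limit + 1) 1) := by
  unfold analyze_traffic
  rw [pvA_loop]

-- ---- B-side ----

theorem pvPositions_getD (l : List String) (a : String) :
    (pvPositions l).getD a [] = pvOcc l a := by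
  unfold pvPositions pvOcc
  have h1 : (PySem.List.enumerate l 0).foldl
        (fun (d : PySem.Dict String (List Int)) p => d.modify p.2 [] (· ++ [p.1]))
        PySem.Dict.empty
      = ((PySem.List.enumerate l 0).map Prod.swap).foldl
        (fun (d : PySem.Dict String (List Int)) p => d.modify p.1 [] (· ++ [p.2]))
        PySem.Dict.empty := by
    rw [List.foldl_map]; simp
  rw [h1, PySem.Dict.getD_foldl_modify_append, List.filter_map, List.map_map]
  simp [Function.comp_def]

theorem pvB_eq_pvF (l : List String) (limit : Int) :
    analyze_traffic_alt l limit = pvF l (max (limit + 1) 1) := by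
  unfold analyze_traffic_alt pvF
  set k := max (limit + 1) 1 with hkdef
  have hk : 1 ≤ k := le_max_right _ _
  apply List.filterMap_congr
  intro p hp
  obtain ⟨j, hj, rfl⟩ := (PySem.List.mem_enumerate_iff _ _ _).mp hp
  simp only [zero_add, Int.toNat_natCast, pvPositions_getD]
  have hval : l[j]? = some (l[j]) := List.getElem?_eq_getElem hj
  have hocc := pvOcc_getElem? l (l[j]) ((k - 1).toNat) j hj hval
  have hget : PySem.List.pyGet? (pvOcc l (l[j])) (k - 1) = (pvOcc l (l[j]))[(k - 1).toNat]? :=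
    pvPyGet?_of_nonneg _ _ (by omega)
  have hlen := pvOcc_length l (l[j])
  by_cases hc : ((l.take (j + 1)).count l[j] : Int) = k
  · rw [if_pos hc, if_pos]
    refine ⟨?_, ?_⟩
    · have h2 := hocc.mpr (by omega)
      obtain ⟨hlt, -⟩ := List.getElem?_eq_some_iff.mp h2
      omega
    · rw [hget]
      exact hocc.mpr (by omega)
  · rw [if_neg hc, if_neg]
    intro ⟨h1, h2⟩
    rw [hget] at h2
    have := hocc.mp h2
    omega

-- ===== VERDICT (by name: the statement is the Claim_ definition above) =====
theorem analyze_traffic_spec : Claim_equal_analyze_traffic := by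
  intro addresses limit _
  unfold Spec_analyze_traffic
  rw [pvA_eq_pvF, pvB_eq_pvF]
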